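-- pv_equiv track=rewrite | github.com/wyk18703232953/myResearch | codeComplex/data/filteredData/python/nlogn/python_nlogn_0236.py | solve
-- ===== SOURCE A (Python) =====
-- def is_on_line(a, b, c):
--     return 1 if (a[0] * (b[1] - c[1]) + b[0] * (c[1] - a[1]) + c[0] * (a[1] - b[1])) == 0 else 0
--
-- def solve(n, a):
--     if n <= 4:
--         return 1
--     line2 = []
--     ok = 1
--     for i in range(n):
--         if not is_on_line(a[0], a[1], a[i]):
--             if len(line2) < 2:
--                 line2.append(i)
--             else:
--                 ok *= is_on_line(a[line2[0]], a[line2[1]], a[i])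
--                 if ok == 0:
--                     break
--     if ok:
--         return 1
--
--     line2 = []
--     ok = 1
--     for i in range(n):
--         if not is_on_line(a[0], a[2], a[i]):
--             if len(line2) < 2:
--                 line2.append(i)
--             else:
--                 ok *= is_on_line(a[line2[0]], a[line2[1]], a[i])
--                 if ok == 0:
--                     break
--     if ok:
--         return 1
--
--     line2 = []
--     ok = 1
--     for i in range(n):
--         if not is_on_line(a[1], a[2], a[i]):
--             if len(line2) < 2:
--                 line2.append(i)
--             else:
--                 ok *= is_on_line(a[line2[0]], a[line2[1]], a[i])
--                 if ok == 0:
--                     break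
--     if ok:
--         return 1
--     return 0
-- ===== SOURCE B (Python) =====
-- def cross(p, q, r):
--     return (q[0] - p[0]) * (r[1] - p[1]) - (q[1] - p[1]) * (r[0] - p[0])
--
-- def solve(n, a):
--     if n <= 4:
--         return 1
--     pts = a[:n]
--     # three candidate-line automata; each carries its base pair and up to two
--     # anchors of the residual line; a dead automaton is dropped from the list
--     live = [(pts[0], pts[1], None, None),
--             (pts[0], pts[2], None, None),
--             (pts[1], pts[2], None, None)]
--     for r in pts:
--         nxt = []
--         for (p, q, f0, f1) in live:
--             if cross(p, q, r) != 0: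
--                 if f0 is None:
--                     nxt.append((p, q, r, None))
--                 elif f1 is None:
--                     nxt.append((p, q, f0, r))
--                 elif cross(f0, f1, r) != 0:
--                     continue  # this candidate dies
--                 else:
--                     nxt.append((p, q, f0, f1))
--             else:
--                 nxt.append((p, q, f0, f1))
--         live = nxt
--         if not live:
--             break
--     return 1 if live else 0
-- ===== Notes on version B (the rewrite author's own statement) =====
-- stated objective: alternative
-- what changed: Transposed the traversal: instead of A's three sequential candidate-major scan loops (index list line2, multiplicative ok flag, early break, early returns), B makes a single points-major pass that drives a shrinking list of three candidate-line automata (base pair plus optional residual-line anchors), pruning dead automata, and answers 1 iff any automaton survives.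
-- outside the precondition, e.g. on solve(9, [(0, 0), (1, 0), (0, 1), (3, 5), (7, 2)]): A returns 0, B returns 0
import Mathlib
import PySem

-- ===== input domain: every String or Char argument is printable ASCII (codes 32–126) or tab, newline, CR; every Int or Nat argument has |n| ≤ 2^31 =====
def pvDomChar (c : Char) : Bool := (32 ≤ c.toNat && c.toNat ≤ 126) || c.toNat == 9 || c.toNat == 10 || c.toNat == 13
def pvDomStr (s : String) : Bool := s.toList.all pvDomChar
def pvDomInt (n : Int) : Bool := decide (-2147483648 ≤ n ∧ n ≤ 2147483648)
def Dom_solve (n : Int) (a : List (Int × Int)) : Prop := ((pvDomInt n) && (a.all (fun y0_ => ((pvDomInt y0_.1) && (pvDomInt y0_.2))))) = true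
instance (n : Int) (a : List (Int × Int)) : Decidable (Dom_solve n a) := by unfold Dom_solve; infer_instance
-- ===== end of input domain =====

-- B transposes A's three candidate-major scan loops into one points-major pass over
-- a shrinking list of candidate-line automata (objective: alternative structure).

-- ===== PORT A =====
def is_on_line (a b c : Int × Int) : Int :=
  if a.1 * (b.2 - c.2) + b.1 * (c.2 - a.2) + c.1 * (a.2 - b.2) = 0 then 1 else 0

-- one of A's three identical loops over the index list range(n); j, k are the two fixed
-- anchor indices; line2 holds indices, ok the running 0/1 product, early return at 0.
-- pyGetD is exact here: Pre_solve keeps every accessed index in range.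
def loopA (a : List (Int × Int)) (j k : Int) : List Int → List Int → Int → Int
  | [], _, ok => ok
  | i :: rest, line2, ok =>
    if is_on_line (PySem.List.pyGetD a j (0,0)) (PySem.List.pyGetD a k (0,0))
        (PySem.List.pyGetD a i (0,0)) = 0 then
      if line2.length < 2 then loopA a j k rest (line2 ++ [i]) ok
      else
        let ok' := ok * is_on_line (PySem.List.pyGetD a (PySem.List.pyGetD line2 0 0) (0,0))
          (PySem.List.pyGetD a (PySem.List.pyGetD line2 1 0) (0,0)) (PySem.List.pyGetD a i (0,0))
        if ok' = 0 then ok' else loopA a j k rest line2 ok'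
    else loopA a j k rest line2 ok

def solve (n : Int) (a : List (Int × Int)) : Int :=
  if n ≤ 4 then 1
  else
    if loopA a 0 1 (PySem.List.pyRange 0 n 1) [] 1 ≠ 0 then 1
    else if loopA a 0 2 (PySem.List.pyRange 0 n 1) [] 1 ≠ 0 then 1
    else if loopA a 1 2 (PySem.List.pyRange 0 n 1) [] 1 ≠ 0 then 1
    else 0

-- ===== PORT B =====
-- an automaton state: base pair (p, q) plus up to two anchors of the residual line
def BSt : Type := (Int × Int) × (Int × Int) × Option (Int × Int) × Option (Int × Int)

def crossB (p q r : Int × Int) : Int :=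
  (q.1 - p.1) * (r.2 - p.2) - (q.2 - p.2) * (r.1 - p.1)

-- the body of B's inner loop: advance one automaton by one point; none = it dies
def advOne (st : BSt) (r : Int × Int) : Option BSt :=
  match st with
  | (p, q, f0, f1) =>
    if crossB p q r ≠ 0 then
      match f0, f1 with
      | none, _ => some (p, q, some r, none)
      | some u, none => some (p, q, some u, some r)
      | some u, some v => if crossB u v r ≠ 0 then none else some (p, q, some u, some v)
    else some (p, q, f0, f1)

-- B's inner for-loop building nxt left to right
def stepLive (r : Int × Int) : List BSt → List BSt
  | [] => []
  | st :: tl =>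
    match advOne st r with
    | none => stepLive r tl
    | some st' => st' :: stepLive r tl

-- B's outer for-loop over the points, with the early break on an empty live list
def runLive : List (Int × Int) → List BSt → List BSt
  | [], live => live
  | r :: rest, live =>
    let nxt := stepLive r live
    if nxt = [] then nxt else runLive rest nxt

def solve_alt (n : Int) (a : List (Int × Int)) : Int :=
  if n ≤ 4 then 1
  else
    let pts := PySem.List.slice a none (some n)
    let p0 := PySem.List.pyGetD pts 0 (0,0)
    let p1 := PySem.List.pyGetD pts 1 (0,0)
    let p2 := PySem.List.pyGetD pts 2 (0,0)
    let live : List BSt := [(p0, p1, none, none), (p0, p2, none, none), (p1, p2, none, none)]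
    if runLive pts live = [] then 0 else 1

-- ===== PRECONDITION & SPEC =====
-- Pre_ excludes 4 < n with n > len(a): there A indexes a[i] past the end and raises IndexError,
-- except when all three loops break early, where A returns 0 (and B returns 0 as well).
def Pre_solve (n : Int) (a : List (Int × Int)) : Prop := n ≤ 4 ∨ n ≤ (a.length : Int)
instance (n : Int) (a : List (Int × Int)) : Decidable (Pre_solve n a) := by unfold Pre_solve; infer_instance
def pvWitness_solve : Int × (List (Int × Int)) := (5, [(0,0),(1,1),(2,2),(3,3),(0,1)])

def Spec_solve (n : Int) (a : List (Int × Int)) (out : Int) : Prop := out = solve_alt n a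
instance (n : Int) (a : List (Int × Int)) (out : Int) : Decidable (Spec_solve n a out) := by unfold Spec_solve; infer_instance

-- ===== CLAIM (what is proved, stated in full; the proofs are below) =====
def Claim_equal_solve : Prop := ∀ (n : Int) (a : List (Int × Int)), Dom_solve n a → Pre_solve n a → Spec_solve n a (solve n a)

-- ===== LEMMAS AND PROOFS =====

-- ghost version of A's loop working directly on points
def loopP (p q : Int × Int) : List (Int × Int) → List (Int × Int) → Int → Int
  | [], _, ok => ok
  | c :: rest, line2, ok =>
    if is_on_line p q c = 0 then
      if line2.length < 2 then loopP p q rest (line2 ++ [c]) ok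
      else
        let ok' := ok * is_on_line (line2.getD 0 (0,0)) (line2.getD 1 (0,0)) c
        if ok' = 0 then ok' else loopP p q rest line2 ok'
    else loopP p q rest line2 ok

-- the points of pts off the line through p and q
def offPoints (p q : Int × Int) (pts : List (Int × Int)) : List (Int × Int) :=
  pts.filter (fun r => is_on_line p q r = 0)

-- "every point beyond the first two lies on the line through the first two"
def coll2 : List (Int × Int) → Bool
  | u :: v :: rest => rest.all (fun r => is_on_line u v r = 1)
  | _ => true

-- ghost single-automaton run: does the automaton survive the whole point list?
def runSt : BSt → List (Int × Int) → Bool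
  | _, [] => true
  | st, r :: rest =>
    match advOne st r with
    | none => false
    | some st' => runSt st' rest

theorem getD2_zero {α : Type} (x y : α) (l : List α) (d : α) : (x :: y :: l).getD 0 d = x := rfl
theorem getD2_one {α : Type} (x y : α) (l : List α) (d : α) : (x :: y :: l).getD 1 d = y := rfl
theorem pyGetD2_zero (u v : Int) (t : List Int) : PySem.List.pyGetD (u :: v :: t) 0 0 = u := by
  simp [PySem.List.pyGetD]
theorem pyGetD2_one (u v : Int) (t : List Int) : PySem.List.pyGetD (u :: v :: t) 1 0 = v := by
  simp [PySem.List.pyGetD]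

theorem loopA_eq_loopP (a : List (Int × Int)) (j k : Int) (idxs line2 : List Int) (ok : Int) :
    loopA a j k idxs line2 ok =
      loopP (PySem.List.pyGetD a j (0,0)) (PySem.List.pyGetD a k (0,0))
        (idxs.map (fun i => PySem.List.pyGetD a i (0,0)))
        (line2.map (fun i => PySem.List.pyGetD a i (0,0))) ok := by
  induction idxs generalizing line2 ok with
  | nil => simp [loopA, loopP]
  | cons i rest ih =>
    simp only [loopA, loopP, List.map_cons, List.length_map]
    by_cases hc : is_on_line (PySem.List.pyGetD a j (0,0)) (PySem.List.pyGetD a k (0,0))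
        (PySem.List.pyGetD a i (0,0)) = 0
    · simp only [if_pos hc]
      by_cases hl : line2.length < 2
      · simp only [if_pos hl]
        rw [ih (line2 ++ [i]) ok]
        simp
      · simp only [if_neg hl]
        match line2 with
        | u :: v :: t =>
          rw [pyGetD2_zero, pyGetD2_one]
          simp only [List.map_cons, getD2_zero, getD2_one]
          by_cases hz : ok * is_on_line (PySem.List.pyGetD a u (0,0)) (PySem.List.pyGetD a v (0,0))
              (PySem.List.pyGetD a i (0,0)) = 0
          · simp only [if_pos hz]
          · simp only [if_neg hz]
            exact ih (u :: v :: t) _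
        | [] => simp at hl
        | [u] => simp at hl
    · simp only [if_neg hc]
      exact ih line2 ok

theorem coll2_short (l : List (Int × Int)) (h : l.length ≤ 2) : coll2 l = true := by
  match l with
  | [] => rfl
  | [u] => rfl
  | [u, v] => rfl
  | u :: v :: w :: t => simp at h

theorem loopP_ne_zero_iff (p q : Int × Int) (pts line2 : List (Int × Int))
    (hlen : line2.length ≤ 2) :
    (loopP p q pts line2 1 ≠ 0) ↔ coll2 (line2 ++ offPoints p q pts) = true := by
  induction pts generalizing line2 with
  | nil =>
    simp only [loopP, offPoints, List.filter_nil, List.append_nil]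
    simp [coll2_short line2 hlen]
  | cons c rest ih =>
    simp only [loopP]
    by_cases hc : is_on_line p q c = 0
    · rw [if_pos hc]
      have hfil : offPoints p q (c :: rest) = c :: offPoints p q rest := by
        simp [offPoints, hc]
      rw [hfil]
      by_cases hl : line2.length < 2
      · rw [if_pos hl]
        rw [ih (line2 ++ [c]) (by simp; omega)]
        simp
      · rw [if_neg hl]
        have h2 : line2.length = 2 := by omega
        match line2 with
        | [u, v] =>
          simp only [getD2_zero, getD2_one, one_mul]
          by_cases hcol : u.1 * (v.2 - c.2) + v.1 * (c.2 - u.2) + c.1 * (u.2 - v.2) = 0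
          · have h1 : is_on_line u v c = 1 := by simp [is_on_line, hcol]
            rw [h1]
            rw [if_neg (by norm_num)]
            rw [ih [u, v] (by simp)]
            simp [coll2, h1]
          · have h0 : is_on_line u v c = 0 := by simp [is_on_line, hcol]
            rw [h0, if_pos rfl]
            simp [coll2, h0]
        | [] => simp at h2
        | [u] => simp at h2
        | u :: v :: w :: t => simp at h2
    · rw [if_neg hc]
      have hfil : offPoints p q (c :: rest) = offPoints p q rest := by
        simp [offPoints, hc]
      rw [hfil]
      exact ih line2 hlen

-- B's determinant equals A's determinant
theorem crossB_eq (p q r : Int × Int) :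
    crossB p q r = p.1 * (q.2 - r.2) + q.1 * (r.2 - p.2) + r.1 * (p.2 - q.2) := by
  unfold crossB; ring

theorem crossB_ne_iff (p q r : Int × Int) : (crossB p q r ≠ 0) ↔ is_on_line p q r = 0 := by
  rw [crossB_eq]
  unfold is_on_line
  split_ifs with h <;> simp [h]

theorem crossB_eq_zero_iff (p q r : Int × Int) : (crossB p q r = 0) ↔ is_on_line p q r = 1 := by
  rw [crossB_eq]
  unfold is_on_line
  split_ifs with h <;> simp [h]

theorem stepLive_eq_filterMap (r : Int × Int) (l : List BSt) :
    stepLive r l = l.filterMap (fun st => advOne st r) := by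
  induction l with
  | nil => rfl
  | cons st tl ih =>
    simp only [stepLive, List.filterMap_cons]
    cases advOne st r with
    | none => exact ih
    | some st' => simp [ih]

theorem runLive_ne_nil_iff (pts : List (Int × Int)) (live : List BSt) :
    (runLive pts live ≠ []) ↔ ∃ st ∈ live, runSt st pts = true := by
  induction pts generalizing live with
  | nil =>
    simp only [runLive, runSt]
    constructor
    · intro h
      match live with
      | [] => exact absurd rfl h
      | st :: tl => exact ⟨st, by simp, trivial⟩
    · rintro ⟨st, hst, -⟩ h
      rw [h] at hst; simp at hst
  | cons r rest ih =>
    simp only [runLive]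
    rw [stepLive_eq_filterMap]
    by_cases hnil : live.filterMap (fun st => advOne st r) = []
    · rw [if_pos hnil]
      constructor
      · intro h
        exact absurd hnil h
      · rintro ⟨st, hst, hrun⟩ _
        have hnone : advOne st r = none := by
          rcases h : advOne st r with _ | st'
          · rfl
          · exfalso
            have : st' ∈ live.filterMap (fun st => advOne st r) :=
              List.mem_filterMap.mpr ⟨st, hst, h⟩
            rw [hnil] at this; simp at this
        simp only [runSt, hnone] at hrun
        exact absurd hrun (by simp)
    · rw [if_neg hnil]
      rw [ih]
      constructor
      · rintro ⟨st', hmem, hrun⟩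
        obtain ⟨st, hst, hadv⟩ := List.mem_filterMap.mp hmem
        exact ⟨st, hst, by simp only [runSt, hadv]; exact hrun⟩
      · rintro ⟨st, hst, hrun⟩
        rcases h : advOne st r with _ | st'
        · simp only [runSt, h] at hrun
          exact absurd hrun (by simp)
        · refine ⟨st', List.mem_filterMap.mpr ⟨st, hst, h⟩, ?_⟩
          simpa only [runSt, h] using hrun

-- the anchor slots of an automaton encode the ≤2-element anchor list line2
theorem runSt_iff (p q : Int × Int) (pts line2 : List (Int × Int)) (hlen : line2.length ≤ 2) :
    (runSt (p, q, line2.head?, line2[1]?) pts = true) ↔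
      coll2 (line2 ++ offPoints p q pts) = true := by
  induction pts generalizing line2 with
  | nil =>
    simp only [runSt, offPoints, List.filter_nil, List.append_nil]
    simp [coll2_short line2 hlen]
  | cons c rest ih =>
    by_cases hc : is_on_line p q c = 0
    · have hcross : crossB p q c ≠ 0 := (crossB_ne_iff p q c).mpr hc
      have hfil : offPoints p q (c :: rest) = c :: offPoints p q rest := by
        simp [offPoints, hc]
      rw [hfil]
      match line2 with
      | [] =>
        have hadv : advOne (p, q, ([] : List (Int × Int)).head?, ([] : List (Int × Int))[1]?) c
            = some (p, q, some c, none) :=    by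
          simp [advOne, hcross]
          rfl
        simp only [runSt, hadv]
        have := ih [c] (by simp)
        simpa using this
      | [u] =>
        have hadv : advOne (p, q, [u].head?, [u][1]?) c = some (p, q, some u, some c) :=    by
          simp [advOne, hcross]
          rfl
        simp only [runSt, hadv]
        have := ih [u, c] (by simp)
        simpa using this
      | [u, v] =>
        by_cases huv : crossB u v c ≠ 0
        · have hadv : advOne (p, q, [u, v].head?, [u, v][1]?) c = none := by
            simp [advOne, hcross, huv]
          simp only [runSt, hadv]
          have h0 : is_on_line u v c = 0 := (crossB_ne_iff u v c).mp huv
          simp [coll2, h0]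
        · have hz : crossB u v c = 0 := by omega
          have h1 : is_on_line u v c = 1 := (crossB_eq_zero_iff u v c).mp hz
          have hadv : advOne (p, q, [u, v].head?, [u, v][1]?) c = some (p, q, some u, some v) := by
            simp [advOne, hcross, hz]
            rfl
          simp only [runSt, hadv]
          have := ih [u, v] (by simp)
          simp only [List.head?_cons, List.getElem?_cons_succ, List.getElem?_cons_zero] at this ⊢
          rw [this]
          simp [coll2, h1]
      | u :: v :: w :: t => simp at hlen
    · have hcross : ¬ crossB p q c ≠ 0 := fun h => hc ((crossB_ne_iff p q c).mp h)
      have hfil : offPoints p q (c :: rest) = offPoints p q rest := by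
        simp [offPoints, hc]
      rw [hfil]
      have hadv : advOne (p, q, line2.head?, line2[1]?) c
          = some (p, q, line2.head?, line2[1]?) := by
        simp [advOne, hcross]
        rfl
      simp only [runSt, hadv]
      exact ih line2 hlen

theorem runSt_start_iff (p q : Int × Int) (pts : List (Int × Int)) :
    (runSt (p, q, none, none) pts = true) ↔ coll2 (offPoints p q pts) = true := by
  have := runSt_iff p q pts [] (by simp)
  simpa using this

theorem map_getD_range {α : Type} (a : List α) (d : α) (m : Nat) (h : m ≤ a.length) :
    (List.range m).map (fun k => a.getD k d) = a.take m := by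
  induction m with
  | zero => simp
  | succ m ih =>
    have hm : m ≤ a.length := Nat.le_of_succ_le h
    rw [List.range_succ, List.map_append, ih hm]
    conv_rhs => rw [List.take_add_one]
    have h' : m < a.length := by omega
    simp only [List.map_cons, List.map_nil, List.getElem?_eq_getElem h', Option.toList_some,
      List.getD_eq_getElem _ _ h']

theorem map_pyGetD_range (a : List (Int × Int)) (n : Int) (h0 : 0 ≤ n) (h : n ≤ (a.length : Int)) :
    (PySem.List.pyRange 0 n 1).map (fun i => PySem.List.pyGetD a i (0,0)) = a.take n.toNat := by
  rw [PySem.List.pyRange_one, List.map_map]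
  have he : ((fun i => PySem.List.pyGetD a i ((0:Int),(0:Int))) ∘ fun k : Nat => (0:Int) + k)
      = fun k : Nat => a.getD k (0,0) := by
    funext k
    simp [Function.comp, PySem.List.pyGetD_natCast]
  rw [he]
  simp only [sub_zero]
  exact map_getD_range a (0,0) n.toNat (by omega)

-- ===== VERDICT (by name: the statement is the Claim_ definition above) =====
theorem solve_spec : Claim_equal_solve := by
  intro n a _ hpre
  unfold Spec_solve
  by_cases h4 : n ≤ 4
  · simp [solve, solve_alt, h4]
  · have hlen : n ≤ (a.length : Int) := hpre.resolve_left h4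
    have h0n : (0:Int) ≤ n := by omega
    have hpts : PySem.List.slice a none (some n) = a.take n.toNat := PySem.List.slice_to a h0n
    have hidx : ∀ j : Int, 0 ≤ j → j < n →
        PySem.List.pyGetD a j (0,0) = PySem.List.pyGetD (a.take n.toNat) j (0,0) := by
      intro j hj0 hjn
      obtain ⟨m, rfl⟩ : ∃ m : Nat, j = (m : Int) := ⟨j.toNat, by omega⟩
      rw [PySem.List.pyGetD_natCast, PySem.List.pyGetD_natCast]
      have h1 : m < a.length := by omega
      have h2 : m < (a.take n.toNat).length := by
        simp only [List.length_take]
        omega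
      rw [List.getD_eq_getElem _ _ h1, List.getD_eq_getElem _ _ h2]
      simp [List.getElem_take]
    -- each of A's loops computes the coll2 condition of its candidate pair
    have hloop : ∀ j k : Int, 0 ≤ j → j < n → 0 ≤ k → k < n →
        ((loopA a j k (PySem.List.pyRange 0 n 1) [] 1 ≠ 0) ↔
          coll2 (offPoints (PySem.List.pyGetD (a.take n.toNat) j (0,0))
            (PySem.List.pyGetD (a.take n.toNat) k (0,0)) (a.take n.toNat)) = true) := by
      intro j k hj0 hjn hk0 hkn
      rw [loopA_eq_loopP a j k _ [] 1, map_pyGetD_range a n h0n hlen]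
      rw [show (([] : List Int).map (fun i => PySem.List.pyGetD a i ((0:Int),(0:Int)))) = [] from rfl]
      rw [loopP_ne_zero_iff _ _ _ [] (by simp)]
      simp only [List.nil_append]
      rw [hidx j hj0 hjn, hidx k hk0 hkn]
    have e1 := hloop 0 1 (by norm_num) (by omega) (by norm_num) (by omega)
    have e2 := hloop 0 2 (by norm_num) (by omega) (by norm_num) (by omega)
    have e3 := hloop 1 2 (by norm_num) (by omega) (by norm_num) (by omega)
    -- B's survivor list is nonempty iff one of the three coll2 conditions holds
    set P := a.take n.toNat with hP
    set q0 := PySem.List.pyGetD P 0 (0,0) with hq0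
    set q1 := PySem.List.pyGetD P 1 (0,0) with hq1
    set q2 := PySem.List.pyGetD P 2 (0,0) with hq2
    have hB : (runLive P [((q0, q1, none, none) : BSt), (q0, q2, none, none), (q1, q2, none, none)] ≠ [])
        ↔ (coll2 (offPoints q0 q1 P) = true ∨ coll2 (offPoints q0 q2 P) = true ∨
            coll2 (offPoints q1 q2 P) = true) := by
      rw [runLive_ne_nil_iff]
      constructor
      · rintro ⟨st, hst, hrun⟩
        simp only [List.mem_cons, List.not_mem_nil, or_false] at hst
        rcases hst with rfl | rfl | rfl
        · exact Or.inl ((runSt_start_iff q0 q1 P).mp hrun)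
        · exact Or.inr (Or.inl ((runSt_start_iff q0 q2 P).mp hrun))
        · exact Or.inr (Or.inr ((runSt_start_iff q1 q2 P).mp hrun))
      · rintro (h | h | h)
        · exact ⟨(q0, q1, none, none), by simp, (runSt_start_iff q0 q1 P).mpr h⟩
        · exact ⟨(q0, q2, none, none), by simp, (runSt_start_iff q0 q2 P).mpr h⟩
        · exact ⟨(q1, q2, none, none), by simp, (runSt_start_iff q1 q2 P).mpr h⟩
    simp only [solve, solve_alt, if_neg h4, hpts, ← hq0, ← hq1, ← hq2]
    by_cases b1 : coll2 (offPoints q0 q1 P) = true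
    · rw [if_pos (e1.mpr b1), if_neg (hB.mpr (Or.inl b1))]
    · rw [if_neg (fun h => b1 (e1.mp h))]
      by_cases b2 : coll2 (offPoints q0 q2 P) = true
      · rw [if_pos (e2.mpr b2), if_neg (hB.mpr (Or.inr (Or.inl b2)))]
      · rw [if_neg (fun h => b2 (e2.mp h))]
        by_cases b3 : coll2 (offPoints q1 q2 P) = true
        · rw [if_pos (e3.mpr b3), if_neg (hB.mpr (Or.inr (Or.inr b3)))]
        · rw [if_neg (fun h => b3 (e3.mp h))]
          rw [if_pos (by
            by_contra hne
            rcases hB.mp hne with h | h | h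
            exacts [b1 h, b2 h, b3 h])]
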